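-- pv_equiv track=rewrite | github.com/gdzjhzh/AIInformationProcessor | services/VideoTranscriptAPI/src/video_transcript_api/utils/rendering/markdown_renderer.py | _fix_indented_tables
-- ===== SOURCE A (Python) =====
-- def _fix_indented_tables(text: str) -> str:
--     """
--     修复缩进的表格，让Markdown解析器能正确识别
--     主要处理嵌套在列表中的表格
--
--     Args:
--         text: 原始文本
--
--     Returns:
--         str: 修复后的文本
--     """
--     lines = text.split('\n')
--     fixed_lines = []
--     in_table = False
--     table_buffer = []
--
--     for i, line in enumerate(lines):
--         # 检查是否是表格行
--         if '|' in line: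
--             stripped = line.strip()
--             # 检查是否是表格分隔符行或表格内容行
--             if ('---' in line or '|-' in line or
--                 (stripped.startswith('|') and stripped.endswith('|')) or
--                 (stripped.count('|') >= 2)):  # 至少包含2个|字符
--
--                 if not in_table:
--                     # 开始新表格，添加空行分隔
--                     if fixed_lines and fixed_lines[-1].strip():
--                         fixed_lines.append('')
--                     in_table = True
--
--                 # 完全移除缩进，确保表格在顶级
--                 table_buffer.append(stripped)
--                 continue
--
--         # 如果之前在处理表格，现在遇到非表格行
--         if in_table:
--             # 将缓存的表格行添加到结果
--             fixed_lines.extend(table_buffer)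
--             # 添加空行分隔表格和后续内容
--             if line.strip():
--                 fixed_lines.append('')
--             table_buffer = []
--             in_table = False
--
--         # 普通行直接添加
--         fixed_lines.append(line)
--
--     # 处理文件末尾的表格
--     if in_table and table_buffer:
--         fixed_lines.extend(table_buffer)
--
--     return '\n'.join(fixed_lines)
-- ===== SOURCE B (Python) =====
-- def _is_table_line(line):
--     if '|' not in line:
--         return False
--     s = line.strip()
--     return ('---' in line or '|-' in line
--             or (s.startswith('|') and s.endswith('|'))
--             or s.count('|') >= 2)
--
--
-- def _runs(lines):
--     """Split lines into maximal consecutive runs of table / non-table lines."""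
--     runs = []
--     i = 0
--     while i < len(lines):
--         flag = _is_table_line(lines[i])
--         j = i + 1
--         while j < len(lines) and _is_table_line(lines[j]) == flag:
--             j += 1
--         runs.append((flag, lines[i:j]))
--         i = j
--     return runs
--
--
-- def _fix_indented_tables(text: str) -> str:
--     out = []
--     prev_table = False
--     for flag, run in _runs(text.split('\n')):
--         if flag:
--             if out and out[-1].strip():
--                 out.append('')
--             out.extend(l.strip() for l in run)
--         else:
--             if prev_table and run[0].strip():
--                 out.append('')
--             out.extend(run)
--         prev_table = flag
--     return '\n'.join(out)
-- ===== Notes on version B (the rewrite author's own statement) =====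
-- stated objective: alternative
-- what changed: Replaces A's single stateful line loop (in_table flag plus a table buffer flushed on exit) by a two-phase design: group the lines into maximal table/non-table runs, then emit each run whole, inserting the blank separators per run.
import Mathlib
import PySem

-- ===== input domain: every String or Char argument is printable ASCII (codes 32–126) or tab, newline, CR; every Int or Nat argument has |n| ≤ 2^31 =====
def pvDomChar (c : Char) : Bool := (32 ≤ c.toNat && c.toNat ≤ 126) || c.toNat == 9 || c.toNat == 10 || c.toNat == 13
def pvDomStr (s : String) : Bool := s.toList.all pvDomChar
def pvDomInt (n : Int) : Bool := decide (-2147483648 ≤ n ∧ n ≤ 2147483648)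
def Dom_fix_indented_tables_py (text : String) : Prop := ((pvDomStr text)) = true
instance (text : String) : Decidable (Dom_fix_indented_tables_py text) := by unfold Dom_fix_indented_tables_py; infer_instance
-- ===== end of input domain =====

-- B regroups A's stateful line loop into "split into maximal table/non-table runs, then emit run by run"; same values, alternative decomposition.

-- ===== PORT A =====
-- one loop iteration of A: state = (fixed_lines, in_table, table_buffer)
def pvAStep : List String × Bool × List String → String → List String × Bool × List String
  | (acc, inTable, buf), line =>
    if (PySem.Str.isIn "|" line &&
        (PySem.Str.isIn "---" line || PySem.Str.isIn "|-" line ||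
         (PySem.Str.startswith (PySem.Str.strip line) "|" &&
          PySem.Str.endswith (PySem.Str.strip line) "|") ||
         decide (2 ≤ PySem.Str.count (PySem.Str.strip line) "|"))) = true then
      -- table row: maybe open a new table with a blank line, buffer the stripped row
      ((if ¬ inTable ∧ acc ≠ [] ∧ PySem.Str.strip (PySem.List.pyGetD acc (-1) "") ≠ "" then
          acc ++ [""] else acc),
       true, buf ++ [PySem.Str.strip line])
    else
      -- non-table line: flush a pending table (blank line if this line is non-empty), then append
      if inTable then
        (acc ++ buf ++ (if PySem.Str.strip line ≠ "" then [""] else []) ++ [line], false, [])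
      else
        (acc ++ [line], false, buf)

-- trailing code of A: flush a table still open at EOF
def pvAFinal (st : List String × Bool × List String) : List String :=
  if st.2.1 = true ∧ st.2.2 ≠ [] then st.1 ++ st.2.2 else st.1

def fix_indented_tables_py (text : String) : String :=
  let lines := (PySem.Str.split? text "\n").getD []
  PySem.Str.join "\n" (pvAFinal (List.foldl pvAStep ([], false, []) lines))

-- ===== PORT B =====
def pvIsTableLine (line : String) : Bool :=
  if PySem.Str.isIn "|" line = false then false
  else
    let s := PySem.Str.strip line
    PySem.Str.isIn "---" line || PySem.Str.isIn "|-" line ||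
      (PySem.Str.startswith s "|" && PySem.Str.endswith s "|") ||
      decide (2 ≤ PySem.Str.count s "|")

-- _runs: maximal consecutive runs of equal _is_table_line flag
def pvRuns : List String → List (Bool × List String)
  | [] => []
  | x :: rest =>
    let b := pvIsTableLine x
    (b, x :: rest.takeWhile (fun l => pvIsTableLine l == b)) ::
      pvRuns (rest.dropWhile (fun l => pvIsTableLine l == b))
termination_by xs => xs.length
decreasing_by
  exact Nat.lt_succ_of_le (List.length_dropWhile_le _ _)

-- the run-emitting loop of B
def pvEmit (prevTable : Bool) (out : List String) : List (Bool × List String) → List String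
  | [] => out
  | (flag, run) :: rest =>
    if flag then
      let out' := if out ≠ [] ∧ PySem.Str.strip (PySem.List.pyGetD out (-1) "") ≠ "" then
                    out ++ [""] else out
      pvEmit true (out' ++ run.map PySem.Str.strip) rest
    else
      let sep := if prevTable ∧ PySem.Str.strip (run.headD "") ≠ "" then [""] else []
      pvEmit false (out ++ sep ++ run) rest

def fix_indented_tables_py_alt (text : String) : String :=
  PySem.Str.join "\n" (pvEmit false [] (pvRuns ((PySem.Str.split? text "\n").getD [])))

-- ===== PRECONDITION & SPEC =====
def Spec_fix_indented_tables_py (text : String) (out : String) : Prop := out = fix_indented_tables_py_alt text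
instance (text : String) (out : String) : Decidable (Spec_fix_indented_tables_py text out) := by unfold Spec_fix_indented_tables_py; infer_instance

-- ===== CLAIM (what is proved, stated in full; the proofs are below) =====
def Claim_equal_fix_indented_tables_py : Prop := ∀ (text : String), Dom_fix_indented_tables_py text → Spec_fix_indented_tables_py text (fix_indented_tables_py text)

-- ===== LEMMAS AND PROOFS =====

-- A's inline table test is B's helper
theorem pvAStep_cond_eq (line : String) :
    (PySem.Str.isIn "|" line &&
      (PySem.Str.isIn "---" line || PySem.Str.isIn "|-" line ||
       (PySem.Str.startswith (PySem.Str.strip line) "|" &&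
        PySem.Str.endswith (PySem.Str.strip line) "|") ||
       decide (2 ≤ PySem.Str.count (PySem.Str.strip line) "|"))) = pvIsTableLine line := by
  unfold pvIsTableLine
  cases PySem.Str.isIn "|" line <;> simp


-- processing a run of table lines while already inside a table just buffers their strips
theorem pvA_table_run (run rest : List String) (acc buf : List String)
    (h : ∀ l ∈ run, pvIsTableLine l = true) :
    List.foldl pvAStep (acc, true, buf) (run ++ rest) =
      List.foldl pvAStep (acc, true, buf ++ run.map PySem.Str.strip) rest := by
  induction run generalizing buf with
  | nil => simp
  | cons x xs ih =>
    have hx : pvIsTableLine x = true := h x (by simp)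
    have hrec := ih (buf ++ [PySem.Str.strip x]) (fun l hl => h l (by simp [hl]))
    simp only [List.cons_append, List.foldl_cons]
    rw [show pvAStep (acc, true, buf) x = (acc, true, buf ++ [PySem.Str.strip x]) by
      simp only [pvAStep]; rw [pvAStep_cond_eq, hx]; simp]
    rw [hrec]; simp

-- processing a run of non-table lines outside a table just appends them
theorem pvA_plain_run (run rest : List String) (acc : List String)
    (h : ∀ l ∈ run, pvIsTableLine l = false) :
    List.foldl pvAStep (acc, false, ([] : List String)) (run ++ rest) =
      List.foldl pvAStep (acc ++ run, false, []) rest := by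
  induction run generalizing acc with
  | nil => simp
  | cons x xs ih =>
    have hx : pvIsTableLine x = false := h x (by simp)
    have hrec := ih (acc ++ [x]) (fun l hl => h l (by simp [hl]))
    simp only [List.cons_append, List.foldl_cons]
    rw [show pvAStep (acc, false, ([] : List String)) x = (acc ++ [x], false, []) by
      simp only [pvAStep]; rw [pvAStep_cond_eq, hx]; simp]
    rw [hrec]; simp

-- the combined strong induction: A's fold agrees with B's run emitter
theorem pvMain (n : Nat) :
    (∀ lines : List String, lines.length ≤ n → ∀ acc,
      pvAFinal (List.foldl pvAStep (acc, false, ([] : List String)) lines) =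
        pvEmit false acc (pvRuns lines)) ∧
    (∀ lines : List String, lines.length ≤ n → ∀ acc buf,
      (lines = [] ∨ pvIsTableLine (lines.headD "") = false) →
      pvAFinal (List.foldl pvAStep (acc, true, buf) lines) =
        pvEmit true (acc ++ buf) (pvRuns lines)) := by
  induction n with
  | zero =>
    constructor
    · intro lines hlen acc
      have : lines = [] := List.eq_nil_of_length_eq_zero (Nat.le_zero.mp hlen)
      subst this; simp [pvAFinal, pvRuns, pvEmit]
    · intro lines hlen acc buf _
      have : lines = [] := List.eq_nil_of_length_eq_zero (Nat.le_zero.mp hlen)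
      subst this
      by_cases hb : buf = [] <;> simp [pvAFinal, pvRuns, pvEmit, hb]
  | succ n ih =>
    obtain ⟨ihM, ihA⟩ := ih
    constructor
    · intro lines hlen acc
      cases lines with
      | nil => simp [pvAFinal, pvRuns, pvEmit]
      | cons x rest =>
        have hlen' : rest.length ≤ n := by simpa using hlen
        cases hb : pvIsTableLine x with
        | false =>
          have hsplit : rest = rest.takeWhile (fun l => pvIsTableLine l == false)
              ++ rest.dropWhile (fun l => pvIsTableLine l == false) :=
            (List.takeWhile_append_dropWhile).symm
          have hall : ∀ l ∈ rest.takeWhile (fun l => pvIsTableLine l == false),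
              pvIsTableLine l = false := by
            intro l hl; simpa using List.mem_takeWhile_imp hl
          have hstep : pvAStep (acc, false, ([] : List String)) x = (acc ++ [x], false, []) := by
            simp only [pvAStep]; rw [pvAStep_cond_eq, hb]; simp
          have hd : (rest.dropWhile (fun l => pvIsTableLine l == false)).length ≤ n :=
            le_trans (List.length_dropWhile_le _ _) hlen'
          rw [List.foldl_cons, hstep]
          conv_lhs => rw [hsplit]
          rw [pvA_plain_run _ _ _ hall, ihM _ hd]
          rw [pvRuns]
          simp [pvEmit, hb]
        | true =>
          have hsplit : rest = rest.takeWhile (fun l => pvIsTableLine l == true)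
              ++ rest.dropWhile (fun l => pvIsTableLine l == true) :=
            (List.takeWhile_append_dropWhile).symm
          have hall : ∀ l ∈ rest.takeWhile (fun l => pvIsTableLine l == true),
              pvIsTableLine l = true := by
            intro l hl; simpa using List.mem_takeWhile_imp hl
          have hstep : pvAStep (acc, false, ([] : List String)) x =
              ((if acc ≠ [] ∧ PySem.Str.strip (PySem.List.pyGetD acc (-1) "") ≠ "" then
                  acc ++ [""] else acc), true, [PySem.Str.strip x]) := by
            simp only [pvAStep]; rw [pvAStep_cond_eq, hb]; simp
          have hd : (rest.dropWhile (fun l => pvIsTableLine l == true)).length ≤ n :=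
            le_trans (List.length_dropWhile_le _ _) hlen'
          have hhead : rest.dropWhile (fun l => pvIsTableLine l == true) = [] ∨
              pvIsTableLine ((rest.dropWhile (fun l => pvIsTableLine l == true)).headD "") = false := by
            cases hdw : rest.dropWhile (fun l => pvIsTableLine l == true) with
            | nil => exact Or.inl rfl
            | cons y ys =>
              right
              have hny := List.head?_dropWhile_not (fun l => pvIsTableLine l == true) rest
              rw [hdw] at hny; simpa using hny
          rw [List.foldl_cons, hstep]
          conv_lhs => rw [hsplit]
          rw [pvA_table_run _ _ _ _ hall, ihA _ hd _ _ hhead]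
          rw [pvRuns]
          simp [pvEmit, hb]
    · intro lines hlen acc buf hh
      cases lines with
      | nil =>
        by_cases hbuf : buf = [] <;> simp [pvAFinal, pvRuns, pvEmit, hbuf]
      | cons y ys =>
        have hlen' : ys.length ≤ n := by simpa using hlen
        have hy : pvIsTableLine y = false := by
          rcases hh with h | h
          · cases h
          · simpa using h
        have hstep : pvAStep (acc, true, buf) y =
            (acc ++ buf ++ (if PySem.Str.strip y ≠ "" then [""] else []) ++ [y], false, []) := by
          simp only [pvAStep]; rw [pvAStep_cond_eq, hy]; simp
        have hsplit : ys = ys.takeWhile (fun l => pvIsTableLine l == false)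
            ++ ys.dropWhile (fun l => pvIsTableLine l == false) :=
          (List.takeWhile_append_dropWhile).symm
        have hall : ∀ l ∈ ys.takeWhile (fun l => pvIsTableLine l == false),
            pvIsTableLine l = false := by
          intro l hl; simpa using List.mem_takeWhile_imp hl
        have hd : (ys.dropWhile (fun l => pvIsTableLine l == false)).length ≤ n :=
          le_trans (List.length_dropWhile_le _ _) hlen'
        rw [List.foldl_cons, hstep]
        conv_lhs => rw [hsplit]
        rw [pvA_plain_run _ _ _ hall, ihM _ hd]
        rw [pvRuns]
        by_cases hsy : PySem.Str.strip y = "" <;> simp [pvEmit, hy, hsy]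

-- ===== VERDICT (by name: the statement is the Claim_ definition above) =====
theorem fix_indented_tables_py_spec : Claim_equal_fix_indented_tables_py := by
  intro text _
  unfold Spec_fix_indented_tables_py fix_indented_tables_py fix_indented_tables_py_alt
  have := (pvMain ((PySem.Str.split? text "\n").getD []).length).1 ((PySem.Str.split? text "\n").getD []) le_rfl []
  simp only [this]
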